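-- pv_equiv track=rewrite | github.com/rkalaniNV/Automodel | nemo_automodel/components/distributed/pipeline.py | generate_hf_model_fqn_per_model_part
-- ===== SOURCE A (Python) =====
-- def generate_hf_model_fqn_per_model_part(
--     num_stages: int,
--     num_layers: int,
--     include_embeddings: bool = True,
--     include_lm_head: bool = True,
-- ) -> list[list[str]]:
--     """
--     Generates module names for each pipeline stage for HuggingFace models.
--
--     Args:
--         num_stages: Number of pipeline stages
--         num_layers: Total number of transformer layers in the model
--         include_embeddings: Whether to include embedding layer in first stage
--         include_lm_head: Whether to include lm_head in last stage (for CausalLM models)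
--
--     Returns:
--         List of lists containing module names for each stage
--
--     Example:
--         generate_hf_model_split(4, 32) might return:
--         [
--             ["model.embed_tokens", "model.layers.0", ..., "model.layers.7"],
--             ["model.layers.8", ..., "model.layers.15"],
--             ["model.layers.16", ..., "model.layers.23"],
--             ["model.layers.24", ..., "model.layers.31", "model.norm", "lm_head"]
--         ]
--     """
--     if num_stages < 1:
--         raise ValueError("Number of stages must be at least 1")
--
--     if num_stages > num_layers:
--         raise ValueError(f"Number of stages ({num_stages}) cannot exceed number of layers ({num_layers})")
--
--     # Calculate base layers per stage and remainder
--     layers_per_stage = num_layers // num_stages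
--     extra_layers = num_layers % num_stages
--
--     module_names_per_stage = []
--     current_layer = 0
--
--     for stage_idx in range(num_stages):
--         stage_modules = []
--
--         # Calculate number of layers for this stage
--         stage_layer_count = layers_per_stage
--         if stage_idx < extra_layers:
--             stage_layer_count += 1
--
--         # First stage: add embeddings if requested
--         if stage_idx == 0 and include_embeddings:
--             stage_modules.append("model.embed_tokens")
--
--         # Add transformer layers for this stage
--         for _ in range(stage_layer_count):
--             stage_modules.append(f"model.layers.{current_layer}")
--             current_layer += 1
--
--         # Last stage: add norm and lm_head if requested
--         if stage_idx == num_stages - 1: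
--             stage_modules.append("model.norm")
--             if include_lm_head:
--                 stage_modules.append("lm_head")
--
--         # Always include rotary_emb in all stages (it's needed for position embeddings)
--         stage_modules.append("model.rotary_emb")
--
--         module_names_per_stage.append(stage_modules)
--
--     return module_names_per_stage
-- ===== SOURCE B (Python) =====
-- def generate_hf_model_fqn_per_model_part(
--     num_stages: int,
--     num_layers: int,
--     include_embeddings: bool = True,
--     include_lm_head: bool = True,
-- ) -> list[list[str]]:
--     if num_stages < 1:
--         raise ValueError("Number of stages must be at least 1")
--     if num_stages > num_layers:
--         raise ValueError(f"Number of stages ({num_stages}) cannot exceed number of layers ({num_layers})")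
--     # Build the stages BACK-TO-FRONT: with k stages still unbuilt and `end` layers left,
--     # the last of them takes the floor share end // k off the tail.  No quotient/remainder
--     # bookkeeping is needed: repeated floor division reproduces the
--     # first-extra_layers-stages-get-one-more split.
--     result = []
--     end = num_layers
--     for k in range(num_stages, 0, -1):  # k = stages still unbuilt; this iteration builds overall stage k-1
--         cnt = end // k
--         names = [f"model.layers.{i}" for i in range(end - cnt, end)]
--         if k == num_stages:  # overall last stage
--             names = names + ["model.norm"] + (["lm_head"] if include_lm_head else [])
--         if k == 1 and include_embeddings:  # overall first stage
--             names = ["model.embed_tokens"] + names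
--         result.append(names + ["model.rotary_emb"])
--         end -= cnt
--     result.reverse()
--     return result
-- ===== Notes on version B (the rewrite author's own statement) =====
-- stated objective: alternative
-- what changed: B builds the stage list back-to-front: with k stages left it peels the floor share end//k of the remaining layers off the tail and prepends the stage, eliminating A's precomputed layers_per_stage/extra_layers remainder bookkeeping and forward layer counter.
import Mathlib
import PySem

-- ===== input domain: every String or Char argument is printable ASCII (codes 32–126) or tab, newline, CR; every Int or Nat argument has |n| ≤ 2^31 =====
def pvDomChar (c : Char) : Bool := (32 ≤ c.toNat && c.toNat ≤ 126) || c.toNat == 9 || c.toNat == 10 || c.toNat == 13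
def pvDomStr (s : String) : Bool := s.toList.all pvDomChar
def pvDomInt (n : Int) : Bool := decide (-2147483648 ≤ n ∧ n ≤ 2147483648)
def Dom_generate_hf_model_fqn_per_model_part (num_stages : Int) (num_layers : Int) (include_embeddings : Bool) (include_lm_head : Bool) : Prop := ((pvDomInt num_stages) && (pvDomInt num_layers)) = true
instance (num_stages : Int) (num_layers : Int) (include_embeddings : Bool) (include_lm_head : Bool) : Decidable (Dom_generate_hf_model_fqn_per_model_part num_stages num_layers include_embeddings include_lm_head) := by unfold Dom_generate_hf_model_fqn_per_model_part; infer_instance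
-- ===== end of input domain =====

-- B builds the stages back-to-front, each taking the floor share end//k of the remaining
-- layers, instead of A's forward pass over a precomputed quotient/remainder (objective:
-- alternative algorithm, same cost).

-- ===== PORT A =====
-- shared name helper: f"model.layers.{i}"
def pvName (i : Int) : String := "model.layers." ++ PySem.Int.toStr i

-- body of A's inner 'for _ in range(stage_layer_count)' loop: append name, bump counter
def pvInnerStep (p : List String × Int) (_ : Int) : List String × Int :=
  (p.1 ++ [pvName p.2], p.2 + 1)

-- body of A's outer 'for stage_idx in range(num_stages)' loop
def pvAStep (num_stages layers_per_stage extra_layers : Int)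
    (include_embeddings include_lm_head : Bool)
    (st : List (List String) × Int) (stage_idx : Int) : List (List String) × Int :=
  let stage_layer_count := layers_per_stage + (if stage_idx < extra_layers then 1 else 0)
  let stage_modules : List String :=
    if stage_idx == 0 && include_embeddings then ["model.embed_tokens"] else []
  let inner := (PySem.List.pyRange 0 stage_layer_count 1).foldl pvInnerStep (stage_modules, st.2)
  let stage_modules := inner.1
  let stage_modules :=
    if stage_idx == num_stages - 1 then
      stage_modules ++ ["model.norm"] ++ (if include_lm_head then ["lm_head"] else [])
    else stage_modules
  let stage_modules := stage_modules ++ ["model.rotary_emb"]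
  (st.1 ++ [stage_modules], inner.2)

def generate_hf_model_fqn_per_model_part (num_stages : Int) (num_layers : Int) (include_embeddings : Bool) (include_lm_head : Bool) : List (List String) :=
  if num_stages < 1 then []        -- Python raises ValueError here; excluded by Pre_
  else if num_stages > num_layers then []   -- Python raises ValueError here; excluded by Pre_
  else
    let layers_per_stage := PySem.Int.floordiv num_layers num_stages
    let extra_layers := PySem.Int.mod num_layers num_stages
    ((PySem.List.pyRange 0 num_stages 1).foldl
      (pvAStep num_stages layers_per_stage extra_layers include_embeddings include_lm_head)
      ([], 0)).1

-- ===== PORT B =====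
-- body of B's 'for k in range(num_stages, 0, -1)' loop: peel the floor share end//k
-- off the tail of the remaining layers and append the finished stage (B reverses at the end)
def pvBStep (num_stages : Int) (include_embeddings include_lm_head : Bool)
    (st : List (List String) × Int) (k : Int) : List (List String) × Int :=
  let e := st.2
  let cnt := PySem.Int.floordiv e k
  let names := (PySem.List.pyRange (e - cnt) e 1).map pvName
  let names :=
    if k == num_stages then
      names ++ ["model.norm"] ++ (if include_lm_head then ["lm_head"] else [])
    else names
  let names :=
    if k == 1 && include_embeddings then ["model.embed_tokens"] ++ names else names
  (st.1 ++ [names ++ ["model.rotary_emb"]], e - cnt)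

def generate_hf_model_fqn_per_model_part_alt (num_stages : Int) (num_layers : Int) (include_embeddings : Bool) (include_lm_head : Bool) : List (List String) :=
  if num_stages < 1 then []        -- Python raises ValueError here; excluded by Pre_
  else if num_stages > num_layers then []   -- Python raises ValueError here; excluded by Pre_
  else
    ((PySem.List.pyRange num_stages 0 (-1)).foldl
      (pvBStep num_stages include_embeddings include_lm_head)
      ([], num_layers)).1.reverse

-- ===== PRECONDITION & SPEC =====
-- Pre_ excludes exactly the inputs where A raises ValueError: num_stages < 1 or num_stages > num_layers.
def Pre_generate_hf_model_fqn_per_model_part (num_stages : Int) (num_layers : Int) (include_embeddings : Bool) (include_lm_head : Bool) : Prop :=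
  1 ≤ num_stages ∧ num_stages ≤ num_layers
instance (num_stages : Int) (num_layers : Int) (include_embeddings : Bool) (include_lm_head : Bool) : Decidable (Pre_generate_hf_model_fqn_per_model_part num_stages num_layers include_embeddings include_lm_head) := by unfold Pre_generate_hf_model_fqn_per_model_part; infer_instance

def pvWitness_generate_hf_model_fqn_per_model_part : Int × Int × Bool × Bool := (2, 5, true, true)

def Spec_generate_hf_model_fqn_per_model_part (num_stages : Int) (num_layers : Int) (include_embeddings : Bool) (include_lm_head : Bool) (out : List (List String)) : Prop := out = generate_hf_model_fqn_per_model_part_alt num_stages num_layers include_embeddings include_lm_head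
instance (num_stages : Int) (num_layers : Int) (include_embeddings : Bool) (include_lm_head : Bool) (out : List (List String)) : Decidable (Spec_generate_hf_model_fqn_per_model_part num_stages num_layers include_embeddings include_lm_head out) := by unfold Spec_generate_hf_model_fqn_per_model_part; infer_instance

-- ===== CLAIM (what is proved, stated in full; the proofs are below) =====
def Claim_equal_generate_hf_model_fqn_per_model_part : Prop := ∀ (num_stages : Int) (num_layers : Int) (include_embeddings : Bool) (include_lm_head : Bool), Dom_generate_hf_model_fqn_per_model_part num_stages num_layers include_embeddings include_lm_head → Pre_generate_hf_model_fqn_per_model_part num_stages num_layers include_embeddings include_lm_head → Spec_generate_hf_model_fqn_per_model_part num_stages num_layers include_embeddings include_lm_head (generate_hf_model_fqn_per_model_part num_stages num_layers include_embeddings include_lm_head)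

-- ===== LEMMAS AND PROOFS =====

-- proof-only middle form: the closed-form contents of stage s (q = layers per stage,
-- r = extra layers); both ports are proved equal to the map of this over 0..S-1
def stageSpec (S q r : Int) (emb head : Bool) (s : Int) : List String :=
  let start := s * q + min s r
  let cnt := q + (if s < r then 1 else 0)
  (if s == 0 && emb then ["model.embed_tokens"] else [])
  ++ (PySem.List.pyRange start (start + cnt) 1).map pvName
  ++ (if s == S - 1 then ["model.norm"] ++ (if head then ["lm_head"] else []) else [])
  ++ ["model.rotary_emb"]

-- A's inner loop, started at counter c, appends the names c, c+1, …, c+n-1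
lemma inner_loop (n : Nat) : ∀ (c : Int) (mods : List String),
    (PySem.List.pyRange 0 (n : Int) 1).foldl pvInnerStep (mods, c)
      = (mods ++ (PySem.List.pyRange c (c + n) 1).map pvName, c + n) := by
  induction n with
  | zero => intro c mods; simp
  | succ n ih =>
    intro c mods
    have h1 : ((n : Int) + 1) = ((n + 1 : Nat) : Int) := by push_cast; ring
    have h2 : PySem.List.pyRange 0 ((n + 1 : Nat) : Int) 1
        = PySem.List.pyRange 0 (n : Int) 1 ++ [(n : Int)] := by
      rw [← h1, PySem.List.pyRange_one_succ_right (by positivity)]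
    rw [h2, List.foldl_append, ih]
    have h3 : PySem.List.pyRange c (c + ((n + 1 : Nat) : Int)) 1
        = PySem.List.pyRange c (c + (n : Int)) 1 ++ [c + n] := by
      rw [← h1]
      rw [show c + ((n : Int) + 1) = (c + (n : Int)) + 1 by ring,
        PySem.List.pyRange_one_succ_right (by omega)]
    rw [h3]
    simp [pvInnerStep]
    omega

-- inner_loop restated for an Int bound
lemma inner_loop_int (cnt : Int) (hc : 0 ≤ cnt) (c : Int) (mods : List String) :
    (PySem.List.pyRange 0 cnt 1).foldl pvInnerStep (mods, c)
      = (mods ++ (PySem.List.pyRange c (c + cnt) 1).map pvName, c + cnt) := by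
  have h := inner_loop cnt.toNat c mods
  rwa [Int.toNat_of_nonneg hc] at h

-- A's outer loop invariant: after n stages the accumulator is the first n closed-form
-- stages and the counter stands at the boundary n*q + min n r
lemma a_outer_loop (S L : Int) (emb head : Bool) (hS : 1 ≤ S) (hSL : S ≤ L) :
    ∀ (n : Nat), (n : Int) ≤ S →
    (PySem.List.pyRange 0 (n : Int) 1).foldl
        (pvAStep S (PySem.Int.floordiv L S) (PySem.Int.mod L S) emb head) ([], 0)
      = ((PySem.List.pyRange 0 (n : Int) 1).map
          (stageSpec S (PySem.Int.floordiv L S) (PySem.Int.mod L S) emb head),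
         (n : Int) * PySem.Int.floordiv L S + min (n : Int) (PySem.Int.mod L S)) := by
  set q := PySem.Int.floordiv L S with hq
  set r := PySem.Int.mod L S with hr
  have hqr : q * S + r = L := PySem.Int.floordiv_mul_add_mod L S
  have hr0 : 0 ≤ r := PySem.Int.mod_nonneg L (by omega)
  have hrS : r < S := PySem.Int.mod_lt L (by omega)
  have hq0 : 1 ≤ q := by nlinarith
  intro n
  induction n with
  | zero => intro _; simp; omega
  | succ n ih =>
    intro hn
    have hn' : (n : Int) ≤ S := by push_cast at hn ⊢; omega
    have h1 : ((n + 1 : Nat) : Int) = (n : Int) + 1 := by push_cast; ring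
    have h2 : PySem.List.pyRange 0 ((n + 1 : Nat) : Int) 1
        = PySem.List.pyRange 0 (n : Int) 1 ++ [(n : Int)] := by
      rw [h1, PySem.List.pyRange_one_succ_right (by positivity)]
    rw [h2, List.foldl_append, ih hn', List.map_append]
    have hcnt0 : 0 ≤ q + (if (n : Int) < r then 1 else 0) := by split <;> omega
    simp only [List.foldl_cons, List.foldl_nil, pvAStep]
    rw [inner_loop_int _ hcnt0]
    rw [Prod.mk.injEq]
    have h4 : min ((n : Int)) r + (if (n : Int) < r then 1 else 0) = min ((n : Int) + 1) r := by
      split <;> omega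
    constructor
    · simp only [List.map_cons, List.map_nil, stageSpec]
      split_ifs <;> simp
    · rw [h1, ← h4]; ring

-- descending range peels its LAST element: range(a, b-1, -1) = range(a, b, -1) ++ [b]
lemma pyRange_neg_one_pred_right (a b : Int) (h : b ≤ a) :
    PySem.List.pyRange a (b - 1) (-1) = PySem.List.pyRange a b (-1) ++ [b] := by
  rw [PySem.List.pyRange_neg_one_eq_reverse, PySem.List.pyRange_neg_one_eq_reverse,
    show b - 1 + 1 = b by ring, PySem.List.pyRange_one_cons (by omega)]
  simp

-- B's loop invariant: after m iterations (k = S, …, S-m+1 processed) the accumulator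
-- holds the closed-form stages S-m … S-1 and `end` stands at (S-m)*q + min (S-m) r
lemma b_loop (S L : Int) (emb head : Bool) (hS : 1 ≤ S) (hSL : S ≤ L) :
    ∀ (m : Nat), (m : Int) ≤ S →
    (PySem.List.pyRange S (S - m) (-1)).foldl (pvBStep S emb head) ([], L)
      = (((PySem.List.pyRange (S - m) S 1).map
          (stageSpec S (PySem.Int.floordiv L S) (PySem.Int.mod L S) emb head)).reverse,
         (S - m) * PySem.Int.floordiv L S + min (S - m) (PySem.Int.mod L S)) := by
  set q := PySem.Int.floordiv L S with hq
  set r := PySem.Int.mod L S with hr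
  have hqr : q * S + r = L := PySem.Int.floordiv_mul_add_mod L S
  have hr0 : 0 ≤ r := PySem.Int.mod_nonneg L (by omega)
  have hrS : r < S := PySem.Int.mod_lt L (by omega)
  have hq0 : 1 ≤ q := by nlinarith
  intro m
  induction m with
  | zero =>
    intro _
    rw [show ((0:Nat):Int) = 0 from rfl, sub_zero,
      PySem.List.pyRange_neg_one_eq_nil le_rfl, PySem.List.pyRange_one_eq_nil le_rfl]
    rw [min_eq_right hrS.le]
    simp only [List.foldl_nil, List.map_nil]
    rw [show S * q + r = L by rw [mul_comm]; exact hqr, List.reverse_nil]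
  | succ m ih =>
    intro hm
    have hm' : (m : Int) ≤ S := by push_cast at hm ⊢; omega
    set k := S - ((m : Int) + 1) + 1 with hk     -- the value processed this iteration
    have hk1 : 1 ≤ k := by push_cast at hm; omega
    have hkS : k ≤ S := by omega
    have h1 : S - ((m + 1 : Nat) : Int) = (S - (m : Int)) - 1 := by push_cast; ring
    have h2 : PySem.List.pyRange S (S - ((m + 1 : Nat) : Int)) (-1)
        = PySem.List.pyRange S (S - (m : Int)) (-1) ++ [S - (m : Int)] := by
      rw [h1, pyRange_neg_one_pred_right _ _ (by omega)]
    rw [h2, List.foldl_append, ih hm']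
    -- this iteration processes k' = S - m, builds overall stage k' - 1
    set k' := S - (m : Int) with hk'
    have hk'1 : 1 ≤ k' := by omega
    have hend : k' * q + min k' r = (k' - 1) * q + min (k' - 1) r + (q + (if k' - 1 < r then 1 else 0)) := by
      by_cases h : k' ≤ r
      · rw [min_eq_left h, min_eq_left (by omega), if_pos (by omega)]; ring
      · rw [min_eq_right (by omega), min_eq_right (by omega), if_neg (by omega)]; ring
    have hcnt : PySem.Int.floordiv (k' * q + min k' r) k' = q + (if k' - 1 < r then 1 else 0) := by
      rw [PySem.Int.floordiv_eq_iff_of_pos (show (0:Int) < k' by omega)]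
      by_cases h : k' ≤ r
      · rw [min_eq_left h, if_pos (by omega)]
        constructor <;> nlinarith
      · rw [min_eq_right (by omega), if_neg (by omega)]
        constructor <;> nlinarith
    simp only [List.foldl_cons, List.foldl_nil, pvBStep]
    rw [hcnt]
    rw [Prod.mk.injEq]
    constructor
    · have h3 : PySem.List.pyRange (k' - 1) S 1 = (k' - 1) :: PySem.List.pyRange k' S 1 := by
        rw [PySem.List.pyRange_one_cons (by omega), show k' - 1 + 1 = k' by ring]
      rw [show S - ((m + 1 : Nat) : Int) = k' - 1 by push_cast; omega, h3, List.map_cons,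
        List.reverse_cons]
      congr 1
      congr 1
      simp only [stageSpec]
      have hb : k' * q + min k' r - (q + (if k' - 1 < r then 1 else 0))
          = (k' - 1) * q + min (k' - 1) r := by omega
      rw [hb]
      have hlast : (k' == S) = ((k' - 1) == S - 1) := by
        rcases eq_or_ne k' S with h | h
        · simp [h]
        · simp [h, show k' - 1 ≠ S - 1 by omega]
      have hfirst : ((k' : Int) == 1) = ((k' - 1) == 0) := by
        rcases eq_or_ne k' 1 with h | h
        · simp [h]
        · simp [h, show k' - 1 ≠ 0 by omega]
      rw [hlast, hfirst]
      have harr : (k' - 1) * q + min (k' - 1) r + (q + (if k' - 1 < r then 1 else 0))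
          = k' * q + min k' r := by omega
      rw [harr]
      split_ifs <;> simp
    · rw [show S - ((m + 1 : Nat) : Int) = k' - 1 by push_cast; ring]
      split_ifs at hend ⊢ <;> omega

-- ===== VERDICT (by name: the statement is the Claim_ definition above) =====
theorem generate_hf_model_fqn_per_model_part_spec : Claim_equal_generate_hf_model_fqn_per_model_part := by
  intro S L emb head _ hpre
  obtain ⟨h1, h2⟩ := hpre
  unfold Spec_generate_hf_model_fqn_per_model_part
  unfold generate_hf_model_fqn_per_model_part generate_hf_model_fqn_per_model_part_alt
  rw [if_neg (by omega), if_neg (by omega), if_neg (by omega), if_neg (by omega)]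
  have hS : ((S.toNat : Nat) : Int) = S := by omega
  have hA := a_outer_loop S L emb head h1 h2 S.toNat (by omega)
  have hB := b_loop S L emb head h1 h2 S.toNat (by omega)
  rw [hS] at hA hB
  simp only [hA]
  rw [show S - S = 0 by ring] at hB
  have : (PySem.List.pyRange S 0 (-1)).foldl (pvBStep S emb head) ([], L)
      = (((PySem.List.pyRange 0 S 1).map
          (stageSpec S (PySem.Int.floordiv L S) (PySem.Int.mod L S) emb head)).reverse,
         0 * PySem.Int.floordiv L S + min 0 (PySem.Int.mod L S)) := hB
  rw [this, List.reverse_reverse]
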